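-- pv_equiv track=rewrite | github.com/olimpiadi-informatica/scolastiche | src/scolastiche/2023/contest/a-5-cancella-permutazione/variants.py | calc_ans2
-- ===== SOURCE A (Python) =====
-- def my_max(x):
--     if len(x) == 0:
--         return -1
--     return max(x)
--
-- def calc_ans2(perm):
--     ans = 0
--     for i in range(len(perm)):
--         for j in range(i+1, len(perm)):
--             for k in range(j+1, len(perm)):
--                 if my_max(perm[0:i]) > perm[i]:
--                     continue
--                 if my_max(perm[i+1:j]) > max(perm[i], perm[j]):
--                     continue
--                 if my_max(perm[j+1:k]) > max(perm[j], perm[k]):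
--                     continue
--                 if my_max(perm[k+1:]) > perm[k]:
--                     continue
--                 ans += 1
--     return ans
-- ===== SOURCE B (Python) =====
-- def calc_ans2(perm):
--     n = len(perm)
--     # pref_ok[i]: my_max(perm[:i]) <= perm[i], via one forward running-max scan
--     pref_ok = []
--     s = None
--     for v in perm:
--         pref_ok.append((-1 if s is None else s) <= v)
--         s = v if s is None else max(s, v)
--     # suf_ok[k]: my_max(perm[k+1:]) <= perm[k], via one backward running-max scan
--     suf_ok = []
--     s = None
--     for v in reversed(perm):
--         suf_ok.append((-1 if s is None else s) <= v)
--         s = v if s is None else max(s, v)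
--     suf_ok.reverse()
--     ans = 0
--     for j in range(n):
--         lcount = 0
--         m = None  # running max of perm[i+1:j]
--         for i in range(j - 1, -1, -1):
--             if pref_ok[i] and (-1 if m is None else m) <= max(perm[i], perm[j]):
--                 lcount += 1
--             m = perm[i] if m is None else max(m, perm[i])
--         rcount = 0
--         m = None  # running max of perm[j+1:k]
--         for k in range(j + 1, n):
--             if suf_ok[k] and (-1 if m is None else m) <= max(perm[j], perm[k]):
--                 rcount += 1
--             m = perm[k] if m is None else max(m, perm[k])
--         ans += lcount * rcount
--     return ans
-- ===== Notes on version B (the rewrite author's own statement) =====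
-- stated objective: faster
-- what changed: A rescans four list slices with my_max inside a triple loop over (i,j,k); B computes prefix/suffix running-max validity flags in two linear scans and, for each j, counts valid left partners i and right partners k with incremental running maxima, returning the sum of L[j]*R[j] - an O(n^2) algorithm instead of A's quartic slice-scanning loop nest.
import Mathlib
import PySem

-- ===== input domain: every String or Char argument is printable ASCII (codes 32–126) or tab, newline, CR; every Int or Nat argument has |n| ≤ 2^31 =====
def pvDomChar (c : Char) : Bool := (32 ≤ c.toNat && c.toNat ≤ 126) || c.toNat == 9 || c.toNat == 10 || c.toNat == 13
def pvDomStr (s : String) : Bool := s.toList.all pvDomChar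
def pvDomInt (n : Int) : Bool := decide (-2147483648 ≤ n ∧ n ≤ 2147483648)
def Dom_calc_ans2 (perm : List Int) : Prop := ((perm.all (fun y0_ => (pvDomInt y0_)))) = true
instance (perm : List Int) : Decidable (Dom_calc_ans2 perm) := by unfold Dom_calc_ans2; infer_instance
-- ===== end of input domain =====

-- B replaces A's quadruple slice-scanning loop nest by prefix/suffix running-max scans and a
-- per-j pairwise count (ans = Σ_j L[j]·R[j]); measurably faster (O(n²) vs A's O(n⁴)-with-slices).

-- ===== PORT A =====
def myMax (x : List Int) : Int :=
  if x.length = 0 then -1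
  else (PySem.List.max? x (fun y => y)).getD 0

def calc_ans2 (perm : List Int) : Int :=
  (PySem.List.pyRange 0 (perm.length : Int) 1).foldl (fun ans i =>
    (PySem.List.pyRange (i + 1) (perm.length : Int) 1).foldl (fun ans j =>
      (PySem.List.pyRange (j + 1) (perm.length : Int) 1).foldl (fun ans k =>
        if myMax (PySem.List.slice perm (some 0) (some i)) > PySem.List.pyGetD perm i 0 then ans
        else if myMax (PySem.List.slice perm (some (i + 1)) (some j)) >
            max (PySem.List.pyGetD perm i 0) (PySem.List.pyGetD perm j 0) then ans
        else if myMax (PySem.List.slice perm (some (j + 1)) (some k)) >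
            max (PySem.List.pyGetD perm j 0) (PySem.List.pyGetD perm k 0) then ans
        else if myMax (PySem.List.slice perm (some (k + 1)) none) > PySem.List.pyGetD perm k 0 then ans
        else ans + 1) ans) ans) 0

-- ===== PORT B =====
-- running-max scan step: '(−1 if s is None else s) <= v' is recorded, then 's = v if s is None else max(s, v)'
def scanStep (st : List Bool × Option Int) (v : Int) : List Bool × Option Int :=
  (st.1 ++ [decide ((match st.2 with | none => -1 | some m => m) ≤ v)],
   some (match st.2 with | none => v | some m => max m v))

def calc_ans2_alt (perm : List Int) : Int :=
  let n : Int := perm.length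
  let prefOk := (perm.foldl scanStep ([], none)).1
  let sufOk := ((perm.reverse.foldl scanStep ([], none)).1).reverse
  (PySem.List.pyRange 0 n 1).foldl (fun ans j =>
    let lc := ((PySem.List.pyRange (j - 1) (-1) (-1)).foldl (fun (st : Int × Option Int) i =>
        ((if PySem.List.pyGetD prefOk i false &&
              decide ((match st.2 with | none => -1 | some m => m) ≤
                max (PySem.List.pyGetD perm i 0) (PySem.List.pyGetD perm j 0))
          then st.1 + 1 else st.1),
         some (match st.2 with
               | none => PySem.List.pyGetD perm i 0
               | some m => max m (PySem.List.pyGetD perm i 0)))) ((0 : Int), none)).1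
    let rc := ((PySem.List.pyRange (j + 1) n 1).foldl (fun (st : Int × Option Int) k =>
        ((if PySem.List.pyGetD sufOk k false &&
              decide ((match st.2 with | none => -1 | some m => m) ≤
                max (PySem.List.pyGetD perm j 0) (PySem.List.pyGetD perm k 0))
          then st.1 + 1 else st.1),
         some (match st.2 with
               | none => PySem.List.pyGetD perm k 0
               | some m => max m (PySem.List.pyGetD perm k 0)))) ((0 : Int), none)).1
    ans + lc * rc) 0

-- ===== PRECONDITION & SPEC =====
def Spec_calc_ans2 (perm : List Int) (out : Int) : Prop := out = calc_ans2_alt perm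
instance (perm : List Int) (out : Int) : Decidable (Spec_calc_ans2 perm out) := by unfold Spec_calc_ans2; infer_instance

-- ===== CLAIM (what is proved, stated in full; the proofs are below) =====
def Claim_equal_calc_ans2 : Prop := ∀ (perm : List Int), Dom_calc_ans2 perm → Spec_calc_ans2 perm (calc_ans2 perm)

-- ===== LEMMAS AND PROOFS =====

-- max of a list with Python's my_max convention: -1 on the empty list
def Mx (l : List Int) : Int := l.max?.getD (-1)

-- p[a:b] as a list of Nat bounds
def seg (p : List Int) (a b : Nat) : List Int := (p.drop a).take (b - a)

-- the two halves of the triple condition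
def cL (p : List Int) (i j : Nat) : Bool :=
  decide (Mx (p.take i) ≤ p.getD i 0) &&
  decide (Mx (seg p (i + 1) j) ≤ max (p.getD i 0) (p.getD j 0))

def cR (p : List Int) (j k : Nat) : Bool :=
  decide (Mx (seg p (j + 1) k) ≤ max (p.getD j 0) (p.getD k 0)) &&
  decide (Mx (p.drop (k + 1)) ≤ p.getD k 0)

def LC (p : List Int) (j : Nat) : Int := ∑ i ∈ Finset.range j, (if cL p i j then (1 : Int) else 0)
def RC (p : List Int) (j : Nat) : Int := ∑ k ∈ Finset.Ico (j + 1) p.length, (if cR p j k then (1 : Int) else 0)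

lemma myMax_eq (l : List Int) : myMax l = Mx l := by
  cases l with
  | nil => simp [myMax, Mx]
  | cons x t => simp [myMax, Mx, PySem.List.max?_id_cons, List.max?]

lemma match_getD (o : Option Int) :
    (match o with | none => -1 | some m => m) = o.getD (-1) := by cases o <;> rfl

lemma max?_snoc (l : List Int) (v : Int) :
    (l ++ [v]).max? = some (match l.max? with | none => v | some m => max m v) := by
  cases l with
  | nil => rfl
  | cons x t => simp [List.max?, List.foldl_append]

lemma foldl_max_init (t : List Int) (a b : Int) :
    t.foldl max (max a b) = max a (t.foldl max b) := by
  induction t generalizing b with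
  | nil => rfl
  | cons x s ih => simp only [List.foldl_cons, max_assoc, ih]

lemma max?_cons (v : Int) (l : List Int) :
    (v :: l).max? = some (match l.max? with | none => v | some m => max m v) := by
  cases l with
  | nil => rfl
  | cons x t =>
    simp only [List.max?]
    congr 1
    rw [List.foldl_cons, foldl_max_init, max_comm]

lemma max?_reverse (l : List Int) : l.reverse.max? = l.max? := by
  induction l with
  | nil => rfl
  | cons x t ih => rw [List.reverse_cons, max?_snoc, ih, max?_cons]

-- the scan invariant for B's running-max passes
lemma scan_spec (xs : List Int) : ∀ (pre : List Int) (acc : List Bool),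
    xs.foldl scanStep (acc, pre.max?) =
      (acc ++ (List.range xs.length).map
          (fun t => decide (Mx (pre ++ xs.take t) ≤ xs.getD t 0)), (pre ++ xs).max?) := by
  induction xs with
  | nil => intro pre acc; simp
  | cons v rest ih =>
    intro pre acc
    have h1 : scanStep (acc, pre.max?) v = (acc ++ [decide (Mx pre ≤ v)], (pre ++ [v]).max?) := by
      simp [scanStep, max?_snoc, match_getD, Mx]
    rw [List.foldl_cons, h1, ih (pre ++ [v])]
    simp only [List.length_cons, List.range_succ_eq_map, List.map_cons, List.map_map, Prod.mk.injEq]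
    constructor
    · simp [Function.comp_def, List.append_assoc, Mx]
    · simp

lemma prefOk_spec (p : List Int) :
    (p.foldl scanStep ([], none)).1 =
      (List.range p.length).map (fun i => decide (Mx (p.take i) ≤ p.getD i 0)) := by
  rw [show (none : Option Int) = ([] : List Int).max? from rfl, scan_spec]
  simp

lemma sufOk_getD (p : List Int) (k : Nat) (hk : k < p.length) :
    ((p.reverse.foldl scanStep ([], none)).1).reverse.getD k false =
      decide (Mx (p.drop (k + 1)) ≤ p.getD k 0) := by
  rw [prefOk_spec]
  have hk1 : k < ((List.range p.reverse.length).map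
      (fun i => decide (Mx (p.reverse.take i) ≤ p.reverse.getD i 0))).reverse.length := by
    simp; omega
  have hk2 : p.length - 1 - k < p.length := by omega
  rw [List.getD_eq_getElem?_getD, List.getElem?_eq_getElem hk1]
  rw [List.getElem_reverse]
  simp only [List.getElem_map, List.getElem_range, List.length_map, List.length_range,
    List.length_reverse]
  have e1 : p.reverse.take (p.length - 1 - k) = (p.drop (k + 1)).reverse := by
    rw [List.take_reverse, show p.length - (p.length - 1 - k) = k + 1 by omega]
  have e2 : p.reverse.getD (p.length - 1 - k) 0 = p.getD k 0 := by
    rw [List.getD_eq_getElem?_getD, List.getD_eq_getElem?_getD, List.getElem?_reverse hk2,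
        show p.length - 1 - (p.length - 1 - k) = k by omega]
  rw [e1, e2]
  simp [Mx, max?_reverse]

lemma seg_snoc (p : List Int) (s k : Nat) (h1 : s ≤ k) (h2 : k < p.length) :
    seg p s (k + 1) = seg p s k ++ [p.getD k 0] := by
  unfold seg
  rw [show k + 1 - s = (k - s) + 1 by omega, List.take_add_one]
  congr 1
  rw [List.getElem?_drop, show s + (k - s) = k by omega, List.getElem?_eq_getElem h2]
  simp [List.getD_eq_getElem?_getD, List.getElem?_eq_getElem h2]

lemma seg_cons (p : List Int) (a j : Nat) (h1 : a < j) (h2 : a < p.length) :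
    seg p a j = p.getD a 0 :: seg p (a + 1) j := by
  unfold seg
  rw [List.drop_eq_getElem_cons h2, show j - a = (j - (a + 1)) + 1 by omega, List.take_succ_cons]
  congr 1
  simp [List.getD_eq_getElem?_getD, List.getElem?_eq_getElem h2]
lemma rloop_spec (p : List Int) (so : List Bool) (j b : Nat) (h3 : b ≤ p.length) :
    ∀ (n a : Nat), b - a = n → j + 1 ≤ a → a ≤ b → ∀ (c : Int) (o : Option Int),
      o = (seg p (j + 1) a).max? →
    (((PySem.List.pyRange (a : Int) (b : Int) 1).foldl (fun (st : Int × Option Int) k =>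
        ((if PySem.List.pyGetD so k false &&
              decide ((match st.2 with | none => -1 | some m => m) ≤
                max (PySem.List.pyGetD p (j : Int) 0) (PySem.List.pyGetD p k 0))
          then st.1 + 1 else st.1),
         some (match st.2 with
               | none => PySem.List.pyGetD p k 0
               | some m => max m (PySem.List.pyGetD p k 0)))) (c, o)).1) =
      c + ∑ k ∈ Finset.Ico a b,
        (if so.getD k false &&
            decide (Mx (seg p (j + 1) k) ≤ max (p.getD j 0) (p.getD k 0)) then (1 : Int) else 0) := by
  intro n
  induction n with
  | zero =>
    intro a h0 h1 h2 c o ho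
    have hab : a = b := by omega
    subst hab
    rw [PySem.List.pyRange_one_eq_nil (by omega)]
    simp
  | succ m ih =>
    intro a h0 h1 h2 c o ho
    subst ho
    have hab : a < b := by omega
    have hal : a < p.length := by omega
    rw [PySem.List.pyRange_one_cons (by exact_mod_cast hab), List.foldl_cons,
        show ((a : Int) + 1) = ((a + 1 : Nat) : Int) by push_cast; ring]
    have hnew : some (match (seg p (j + 1) a).max? with
        | none => PySem.List.pyGetD p (a : Int) 0
        | some m => max m (PySem.List.pyGetD p (a : Int) 0)) = (seg p (j + 1) (a + 1)).max? := by
      rw [seg_snoc p (j + 1) a h1 hal, max?_snoc]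
      simp only [PySem.List.pyGetD_natCast]
    refine Eq.trans (ih (a + 1) (by omega) (by omega) (by omega) _ _ hnew) ?_
    rw [Finset.sum_eq_sum_Ico_succ_bot hab]
    simp only [PySem.List.pyGetD_natCast, match_getD]
    rw [show ((seg p (j + 1) a).max?.getD (-1)) = Mx (seg p (j + 1) a) from rfl]
    split_ifs <;> ring

lemma lloop_spec (p : List Int) (po : List Bool) (j : Nat) (hj : j ≤ p.length) :
    ∀ (a : Nat), a < j → ∀ (c : Int) (o : Option Int), o = (seg p (a + 1) j).max? →
    (((PySem.List.pyRange (a : Int) (-1) (-1)).foldl (fun (st : Int × Option Int) i =>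
        ((if PySem.List.pyGetD po i false &&
              decide ((match st.2 with | none => -1 | some m => m) ≤
                max (PySem.List.pyGetD p i 0) (PySem.List.pyGetD p (j : Int) 0))
          then st.1 + 1 else st.1),
         some (match st.2 with
               | none => PySem.List.pyGetD p i 0
               | some m => max m (PySem.List.pyGetD p i 0)))) (c, o)).1) =
      c + ∑ i ∈ Finset.range (a + 1),
        (if po.getD i false &&
            decide (Mx (seg p (i + 1) j) ≤ max (p.getD i 0) (p.getD j 0)) then (1 : Int) else 0) := by
  intro a
  induction a with
  | zero =>
    intro h1 c o ho
    subst ho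
    rw [PySem.List.pyRange_neg_one_cons (by norm_num), List.foldl_cons,
        show ((0 : Nat) : Int) - 1 = (-1 : Int) by norm_num,
        PySem.List.pyRange_neg_one_eq_nil (by norm_num), List.foldl_nil]
    simp only [PySem.List.pyGetD_natCast, match_getD]
    rw [show ((seg p (0 + 1) j).max?.getD (-1)) = Mx (seg p (0 + 1) j) from rfl]
    simp only [zero_add, Finset.range_one, Finset.sum_singleton]
    split_ifs <;> ring
  | succ a' ih =>
    intro h1 c o ho
    subst ho
    have hal : a' + 1 < p.length := by omega
    rw [PySem.List.pyRange_neg_one_cons (by push_cast; omega), List.foldl_cons]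
    rw [show (((a' + 1 : Nat) : Int) - 1) = ((a' : Nat) : Int) by push_cast; ring]
    have hnew : some (match (seg p (a' + 1 + 1) j).max? with
        | none => PySem.List.pyGetD p ((a' + 1 : Nat) : Int) 0
        | some m => max m (PySem.List.pyGetD p ((a' + 1 : Nat) : Int) 0)) =
        (seg p (a' + 1) j).max? := by
      rw [seg_cons p (a' + 1) j h1 hal, max?_cons]
      simp only [PySem.List.pyGetD_natCast]
    refine Eq.trans (ih (by omega) _ _ hnew) ?_
    rw [Finset.sum_range_succ _ (a' + 1)]
    simp only [PySem.List.pyGetD_natCast, match_getD]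
    rw [show ((seg p (a' + 1 + 1) j).max?.getD (-1)) = Mx (seg p (a' + 1 + 1) j) from rfl]
    split_ifs <;> ring
lemma seg_self (p : List Int) (a : Nat) : seg p a a = [] := by simp [seg]

lemma prefOk_getD (p : List Int) (i : Nat) (hi : i < p.length) :
    (p.foldl scanStep ([], none)).1.getD i false = decide (Mx (p.take i) ≤ p.getD i 0) := by
  rw [prefOk_spec, List.getD_eq_getElem?_getD, List.getElem?_map, List.getElem?_range hi]
  rfl

lemma foldl_range_congr_add (n : Nat) (f : Int → Nat → Int) (g : Nat → Int)
    (h : ∀ x < n, ∀ acc, f acc x = acc + g x) (a : Int) :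
    (List.range n).foldl f a = a + ∑ t ∈ Finset.range n, g t := by
  induction n with
  | zero => simp
  | succ m ih =>
    rw [List.range_succ, List.foldl_append, List.foldl_cons, List.foldl_nil,
        ih (fun x hx acc => h x (by omega) acc), h m (by omega), Finset.sum_range_succ]
    ring

lemma calcB_eq (p : List Int) :
    calc_ans2_alt p = ∑ j ∈ Finset.range p.length, LC p j * RC p j := by
  simp only [calc_ans2_alt]
  rw [PySem.List.pyRange_one, show ((p.length : Int) - 0).toNat = p.length by omega,
      List.foldl_map]
  refine Eq.trans (foldl_range_congr_add p.length _ (fun jn => LC p jn * RC p jn) ?_ 0) (by simp)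
  intro jn hj ans
  · show ans + _ = ans + _
    simp only [zero_add]
    congr 1
    congr 1
    · -- lc = LC p jn
      cases jn with
      | zero =>
        rw [show ((0 : Nat) : Int) - 1 = (-1 : Int) by norm_num,
            PySem.List.pyRange_neg_one_eq_nil (by norm_num)]
        simp [LC]
      | succ a =>
        rw [show (((a + 1 : Nat)) : Int) - 1 = ((a : Nat) : Int) by push_cast; ring,
            lloop_spec p _ (a + 1) (by omega) a (by omega) 0 none (by simp [seg_self]),
            zero_add]
        refine Finset.sum_congr rfl (fun i hi => ?_)
        have hil : i < p.length := by
          have := Finset.mem_range.mp hi; omega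
        rw [prefOk_getD p i hil]
        simp [cL]
    · -- rc = RC p jn
      rw [show ((jn : Int) + 1) = ((jn + 1 : Nat) : Int) by push_cast; ring,
          rloop_spec p _ jn p.length le_rfl (p.length - (jn + 1)) (jn + 1) rfl le_rfl
            (by omega) 0 none (by simp [seg_self]),
          zero_add]
      refine Finset.sum_congr rfl (fun k hk => ?_)
      have hkl : k < p.length := (Finset.mem_Ico.mp hk).2
      rw [sufOk_getD p k hkl]
      simp [cR, Bool.and_comm]
lemma ite_and_mul (a b : Bool) :
    (if (a && b) then (1 : Int) else 0) = (if a then (1 : Int) else 0) * (if b then (1 : Int) else 0) := by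
  cases a <;> cases b <;> simp

lemma bodyA_eq (p : List Int) (i j k : Nat) (_hij : i < j) (_hjk : j < k) (ans : Int) :
    (if myMax (PySem.List.slice p (some 0) (some (i : Int))) > PySem.List.pyGetD p (i : Int) 0 then ans
     else if myMax (PySem.List.slice p (some ((i : Int) + 1)) (some (j : Int))) >
         max (PySem.List.pyGetD p (i : Int) 0) (PySem.List.pyGetD p (j : Int) 0) then ans
     else if myMax (PySem.List.slice p (some ((j : Int) + 1)) (some (k : Int))) >
         max (PySem.List.pyGetD p (j : Int) 0) (PySem.List.pyGetD p (k : Int) 0) then ans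
     else if myMax (PySem.List.slice p (some ((k : Int) + 1)) none) > PySem.List.pyGetD p (k : Int) 0 then ans
     else ans + 1) = ans + (if cL p i j && cR p j k then (1 : Int) else 0) := by
  rw [show ((i : Int) + 1) = ((i + 1 : Nat) : Int) by push_cast; ring,
      show ((j : Int) + 1) = ((j + 1 : Nat) : Int) by push_cast; ring,
      show ((k : Int) + 1) = ((k + 1 : Nat) : Int) by push_cast; ring]
  simp only [PySem.List.slice_zero_start, PySem.List.slice_to_natCast, PySem.List.slice_natCast,
    PySem.List.slice_from_natCast, PySem.List.pyGetD_natCast, myMax_eq]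
  simp only [cL, cR, seg, Bool.and_eq_true, decide_eq_true_eq]
  split_ifs <;> omega

lemma calcA_eq (p : List Int) :
    calc_ans2 p = ∑ i ∈ Finset.range p.length, ∑ j ∈ Finset.Ico (i + 1) p.length,
      (if cL p i j then (1 : Int) else 0) * RC p j := by
  simp only [calc_ans2]
  rw [PySem.List.pyRange_one, show ((p.length : Int) - 0).toNat = p.length by omega,
      List.foldl_map]
  refine Eq.trans (foldl_range_congr_add p.length _
    (fun i => ∑ j ∈ Finset.Ico (i + 1) p.length, (if cL p i j then (1 : Int) else 0) * RC p j)
    ?_ 0) (by simp)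
  intro i hi ans
  simp only [zero_add]
  rw [show ((i : Int) + 1) = ((i + 1 : Nat) : Int) by push_cast; ring,
      PySem.List.pyRange_one, show ((p.length : Int) - ((i + 1 : Nat) : Int)).toNat = p.length - (i + 1) by omega,
      List.foldl_map]
  refine Eq.trans (foldl_range_congr_add (p.length - (i + 1)) _
    (fun t => ∑ k ∈ Finset.Ico ((i + 1 + t) + 1) p.length,
      (if cL p i (i + 1 + t) && cR p (i + 1 + t) k then (1 : Int) else 0)) ?_ ans) ?_
  · intro t ht acc
    rw [show ((i + 1 : Nat) : Int) + (t : Int) = ((i + 1 + t : Nat) : Int) by push_cast; ring]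
    rw [show ((i + 1 + t : Nat) : Int) + 1 = ((i + 1 + t + 1 : Nat) : Int) by push_cast; ring,
        PySem.List.pyRange_one,
        show ((p.length : Int) - ((i + 1 + t + 1 : Nat) : Int)).toNat = p.length - (i + 1 + t + 1) by omega,
        List.foldl_map]
    refine Eq.trans (foldl_range_congr_add (p.length - (i + 1 + t + 1)) _
      (fun s => (if cL p i (i + 1 + t) && cR p (i + 1 + t) (i + 1 + t + 1 + s) then (1 : Int) else 0)) ?_ acc) ?_
    · intro s hs acc2
      rw [show ((i + 1 + t + 1 : Nat) : Int) + (s : Int) = ((i + 1 + t + 1 + s : Nat) : Int) by push_cast; ring]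
      exact bodyA_eq p i (i + 1 + t) (i + 1 + t + 1 + s) (by omega) (by omega) acc2
    · congr 1
      beta_reduce
      rw [Finset.sum_Ico_eq_sum_range]
  · congr 1
    rw [Finset.sum_Ico_eq_sum_range]
    refine Finset.sum_congr rfl (fun t ht => ?_)
    simp only [RC]
    rw [Finset.mul_sum]
    exact Finset.sum_congr rfl (fun k _ => ite_and_mul _ _)

lemma sum_swap_tri (n : Nat) (F : Nat → Nat → Int) :
    ∑ i ∈ Finset.range n, ∑ j ∈ Finset.Ico (i + 1) n, F i j =
      ∑ j ∈ Finset.range n, ∑ i ∈ Finset.range j, F i j := by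
  have e1 : ∀ i : Nat, Finset.Ico (i + 1) n = Finset.filter (fun j => i < j) (Finset.range n) := by
    intro i; ext x; simp [Finset.mem_Ico, Finset.mem_filter]; omega
  have e2 : ∀ j : Nat, j < n → Finset.filter (fun i => i < j) (Finset.range n) = Finset.range j := by
    intro j hj; ext x; simp [Finset.mem_filter]; omega
  rw [Finset.sum_congr rfl (fun i _ => by rw [e1 i, Finset.sum_filter])]
  rw [Finset.sum_comm]
  refine Finset.sum_congr rfl (fun j hj => ?_)
  rw [← Finset.sum_filter, e2 j (Finset.mem_range.mp hj)]

-- ===== VERDICT (by name: the statement is the Claim_ definition above) =====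
theorem calc_ans2_spec : Claim_equal_calc_ans2 := by
  intro p _
  show calc_ans2 p = calc_ans2_alt p
  rw [calcA_eq, calcB_eq, sum_swap_tri]
  refine Finset.sum_congr rfl (fun j _ => ?_)
  simp only [LC]
  rw [Finset.sum_mul]
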